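-- pv_equiv track=rewrite | github.com/privacyrating/general | clustering/dcbsca3.py | rename_labels
-- ===== SOURCE A (Python) =====
-- import collections
--
-- def rename_labels(labels):
--     d = collections.Counter(labels)
--     l = []
--     for key in d:
--         l.append(key)
--
--     l = sorted(l)
--     new = dict()
--     for i, label in enumerate(l):
--         new[label] = i
--
--     labels_new = []
--     for label in labels:
--         labels_new.append(new[label])
--
--     return labels_new
-- ===== SOURCE B (Python) =====
-- def rename_labels(labels):
--     uniq = set(labels)
--     return [sum(y < x for y in uniq) for x in labels]
-- ===== Notes on version B (the rewrite author's own statement) =====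
-- stated objective: alternative
-- what changed: Drops the whole sort/Counter/rank-dict pipeline: each label's new value is computed directly as the number of distinct labels strictly smaller than it (a count over set(labels)), no sorting and no mapping structure at all.
import Mathlib
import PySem

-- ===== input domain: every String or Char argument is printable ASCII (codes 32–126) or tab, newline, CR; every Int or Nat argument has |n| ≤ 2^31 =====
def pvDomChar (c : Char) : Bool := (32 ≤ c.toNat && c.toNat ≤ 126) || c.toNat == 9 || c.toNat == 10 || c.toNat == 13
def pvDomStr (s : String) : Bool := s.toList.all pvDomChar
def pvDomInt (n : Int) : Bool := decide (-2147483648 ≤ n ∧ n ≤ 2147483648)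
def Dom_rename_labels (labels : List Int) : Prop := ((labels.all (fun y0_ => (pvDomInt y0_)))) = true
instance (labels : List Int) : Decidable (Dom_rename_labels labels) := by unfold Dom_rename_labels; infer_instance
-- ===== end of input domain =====

-- B replaces A's sort/Counter/rank-dict pipeline by a direct count: each label maps to the
-- number of distinct labels strictly smaller than it (alternative decomposition, no sorting).

-- ===== PORT A =====
-- A: Counter -> key list -> sorted -> rank dict -> lookup per label.
def rename_labels (labels : List Int) : List Int :=
  let d := PySem.Dict.counter labels
  let l := d.keys.foldl (fun acc key => acc ++ [key]) []
  let l2 := PySem.List.sorted l (fun x => x)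
  let new := (PySem.List.enumerate l2).foldl (fun nd p => nd.insert p.2 p.1) PySem.Dict.empty
  -- new[label]: the key is always present (every label is a key of the Counter), so the
  -- default 0 of getD is never read — exact for Python's new[label]
  labels.foldl (fun acc label => acc ++ [new.getD label 0]) []

-- ===== PORT B =====
-- B: uniq = set(labels); each label -> sum(y < x for y in uniq).
-- The sum over the set is a count, independent of the set's iteration order.
def rename_labels_alt (labels : List Int) : List Int :=
  let uniq : PySem.Set Int := PySem.Set.ofList labels
  labels.map (fun x => ((uniq.countP (fun y => decide (y < x)) : Nat) : Int))

-- ===== PRECONDITION & SPEC =====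
def Spec_rename_labels (labels : List Int) (out : List Int) : Prop := out = rename_labels_alt labels
instance (labels : List Int) (out : List Int) : Decidable (Spec_rename_labels labels out) := by unfold Spec_rename_labels; infer_instance

-- ===== CLAIM =====
def Claim_equal_rename_labels : Prop := ∀ (labels : List Int), Dom_rename_labels labels → Spec_rename_labels labels (rename_labels labels)

-- ===== LEMMAS AND PROOFS =====

-- keys not in the enumerated list keep their old value through A's rank-dict loop
theorem getD_rank_dict_not_mem (s : List Int) (d : PySem.Dict Int Int) (i : Int) (x : Int)
    (hx : x ∉ s) :
    ((PySem.List.enumerate s i).foldl (fun nd p => nd.insert p.2 p.1) d).getD x 0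
      = d.getD x 0 := by
  induction s generalizing d i with
  | nil => simp [PySem.List.enumerate_nil]
  | cons y t ih =>
    simp only [PySem.List.enumerate_cons, List.foldl_cons]
    rw [ih _ _ (fun h => hx (List.mem_cons_of_mem _ h))]
    exact PySem.Dict.getD_insert_of_ne _ _ _ (fun h => hx (h ▸ List.mem_cons_self))

-- the rank dict built by A's enumerate loop maps each member of s to its index
theorem getD_rank_dict (s : List Int) (d : PySem.Dict Int Int) (i : Int) (x : Int)
    (hnd : s.Nodup) (hx : x ∈ s) :
    ((PySem.List.enumerate s i).foldl (fun nd p => nd.insert p.2 p.1) d).getD x 0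
      = i + (s.idxOf x : Int) := by
  induction s generalizing d i with
  | nil => cases hx
  | cons y t ih =>
    simp only [PySem.List.enumerate_cons, List.foldl_cons]
    by_cases hxy : x = y
    · subst hxy
      have hxt : x ∉ t := (List.nodup_cons.mp hnd).1
      rw [getD_rank_dict_not_mem t _ _ x hxt, PySem.Dict.getD_insert_self]
      simp
    · have hxt : x ∈ t := (List.mem_cons.mp hx).resolve_left hxy
      rw [ih _ (i + 1) (List.nodup_cons.mp hnd).2 hxt]
      rw [List.idxOf_cons_ne _ (fun h => hxy (by exact_mod_cast h.symm))]
      push_cast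
      ring

-- on a strictly increasing list, the index of a member is the count of smaller elements
theorem idxOf_eq_countP_lt (s : List Int) (x : Int)
    (hs : s.Pairwise (· < ·)) (hx : x ∈ s) :
    s.idxOf x = s.countP (fun y => decide (y < x)) := by
  induction s with
  | nil => cases hx
  | cons y t ih =>
    obtain ⟨hyt, hst⟩ := List.pairwise_cons.mp hs
    by_cases hxy : x = y
    · subst hxy
      rw [List.idxOf_cons_self]
      have : t.countP (fun y => decide (y < x)) = 0 := by
        rw [List.countP_eq_zero]
        intro a ha
        simpa using not_lt.mpr (le_of_lt (hyt a ha))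
      simp [this]
    · have hxt : x ∈ t := (List.mem_cons.mp hx).resolve_left hxy
      have hyx : y < x := hyt x hxt
      rw [List.idxOf_cons_ne _ (fun h => hxy (by exact_mod_cast h.symm))]
      simp [hyx, ih hst hxt]

-- ===== VERDICT =====
theorem rename_labels_spec : Claim_equal_rename_labels := by
  intro labels _
  unfold Spec_rename_labels rename_labels rename_labels_alt
  simp only [PySem.List.foldl_append_singleton, PySem.Dict.keys_counter, List.nil_append,
    PySem.List.foldl_append_singleton_eq_map]
  apply List.map_congr_left
  intro x hx
  set s := PySem.List.sorted (PySem.Set.ofList labels) (fun x => x) with hsdef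
  have hslt : s.Pairwise (· < ·) := PySem.List.sorted_ofList_pairwise_lt labels
  have hxs : x ∈ s := by
    rw [hsdef, PySem.List.mem_sorted]
    exact (PySem.Set.mem_ofList _ _).mpr hx
  have hperm : s.Perm (PySem.Set.ofList labels) := PySem.List.sorted_perm _ _ _
  rw [getD_rank_dict s _ 0 x (hslt.imp (fun h => ne_of_lt h)) hxs,
    idxOf_eq_countP_lt s x hslt hxs, hperm.countP_eq]
  simp
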